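-- pv_equiv track=rewrite | github.com/mwootten/seizure-forecasting | src/features-old/survival_features.py | select_segments_part
-- ===== SOURCE A (Python) =====
-- SECONDS_PER_SEGMENT = 5
--
-- def overlaps(s1, s2):
--     """
--     Determines whether segments specified by their endpoints overlap.
--     """
--     (i1, f1) = s1
--     (i2, f2) = s2
--     return ((i1 < f2) and (i2 < f1)) or ((i2 < f1) and (i1 < f2))
--
-- def any_overlap(t_i, t_f, segments):
--     """
--     Extends `overlaps` to check against an artitrary number of segments at once
--     """
--     return any(overlaps((t_i, t_f), seg) for seg in segments)
--
-- def select_segments_part(num_segments, seizure_times):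
--     end_time = num_segments * SECONDS_PER_SEGMENT
--     num_seizures = len(seizure_times)
--     indices = [[] for _ in range(num_seizures + 1)]
--     Y = [[] for _ in range(num_seizures + 1)]
--     for segment_num in range(num_segments):
--         t_i = SECONDS_PER_SEGMENT * (segment_num + 0)
--         t_f = SECONDS_PER_SEGMENT * (segment_num + 1)
--         overlaps_seizure = any_overlap(t_i, t_f, seizure_times)
--         time_before_each_seizure = [
--             # the time from the end of the segment to the seizure start
--             (st_i - t_f, seizure_index)
--             # for all of the seizures
--             for (seizure_index, (st_i, st_f)) in enumerate(seizure_times)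
--             # if the segment ends before the seizure begins
--             if t_f <= st_i
--         ]
--         # If no segments meet the requirements, then just add None
--         # otherwise,
--         (time_before_last_seizure, last_seizure_index) = \
--             min(time_before_each_seizure, default=(None, None))
--         if overlaps_seizure:
--             pass
--         elif time_before_last_seizure is None:
--             # Censorship!
--             indices[num_seizures].append(segment_num)
--             Y[-1].append(end_time - t_f)
--         else:
--             indices[last_seizure_index].append(segment_num)
--             Y[last_seizure_index].append(time_before_last_seizure)
--
--     return (indices, Y)
-- ===== SOURCE B (Python) =====
-- SECONDS_PER_SEGMENT = 5
--
-- def select_segments_part(num_segments, seizure_times):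
--     # One sweep: seizures sorted once by (start, index); a monotone pointer j and a
--     # running maximum of seizure end times replace A's per-segment scans.
--     n = len(seizure_times)
--     end_time = num_segments * SECONDS_PER_SEGMENT
--     order = sorted(enumerate(seizure_times), key=lambda p: (p[1][0], p[0]))
--     indices = [[] for _ in range(n + 1)]
--     Y = [[] for _ in range(n + 1)]
--     j = 0
--     max_end = None
--     for seg in range(num_segments):
--         t_i = SECONDS_PER_SEGMENT * seg
--         t_f = t_i + SECONDS_PER_SEGMENT
--         while j < n and order[j][1][0] < t_f:
--             e = order[j][1][1]
--             if max_end is None or e > max_end: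
--                 max_end = e
--             j += 1
--         if max_end is not None and max_end > t_i:
--             continue  # segment overlaps a seizure
--         if j == n:
--             indices[n].append(seg)
--             Y[n].append(end_time - t_f)
--         else:
--             k, (si, _sf) = order[j]
--             indices[k].append(seg)
--             Y[k].append(si - t_f)
--     return (indices, Y)
-- ===== Notes on version B (the rewrite author's own statement) =====
-- stated objective: faster
-- what changed: B sorts the seizures once by (start time, index) and sweeps the segments with a monotone pointer plus a running maximum of seizure end times, so the nearest future seizure and the overlap test are O(1) amortized per segment instead of A's two full scans of all seizures for every segment.
import Mathlib
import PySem

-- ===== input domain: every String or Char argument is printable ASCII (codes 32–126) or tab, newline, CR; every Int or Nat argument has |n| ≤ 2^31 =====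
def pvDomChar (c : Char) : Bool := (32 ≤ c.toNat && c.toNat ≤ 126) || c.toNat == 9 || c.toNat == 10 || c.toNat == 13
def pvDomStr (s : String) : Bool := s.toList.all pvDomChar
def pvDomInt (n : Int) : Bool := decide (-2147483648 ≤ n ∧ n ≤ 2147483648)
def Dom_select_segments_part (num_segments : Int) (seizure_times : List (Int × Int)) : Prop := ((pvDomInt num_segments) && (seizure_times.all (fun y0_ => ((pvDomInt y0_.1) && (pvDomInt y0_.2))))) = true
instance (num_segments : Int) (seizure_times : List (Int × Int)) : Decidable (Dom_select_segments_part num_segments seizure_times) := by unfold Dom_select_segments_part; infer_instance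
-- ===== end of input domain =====

-- B replaces A's per-segment scans (an `any_overlap` pass plus a min-comprehension pass over all
-- seizures for every segment) with one sort of the seizures by (start, index) and a single sweep:
-- a monotone pointer and a running maximum of seizure end times; objective: faster.

-- ===== PORT A =====
def pvOverlaps (s1 s2 : Int × Int) : Bool :=
  (decide (s1.1 < s2.2) && decide (s2.1 < s1.2)) || (decide (s2.1 < s1.2) && decide (s1.1 < s2.2))

def pvAnyOverlap (t_i t_f : Int) (segments : List (Int × Int)) : Bool :=
  segments.any (fun seg => pvOverlaps (t_i, t_f) seg)

def pvStepA (num_seizures : Nat) (end_time : Int) (seizure_times : List (Int × Int))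
    (acc : List (List Int) × List (List Int)) (segment_num : Int) :
    List (List Int) × List (List Int) :=
  let t_i := 5 * (segment_num + 0)
  let t_f := 5 * (segment_num + 1)
  let overlaps_seizure := pvAnyOverlap t_i t_f seizure_times
  let time_before_each_seizure :=
    ((PySem.List.enumerate seizure_times).filter (fun p => decide (t_f ≤ p.2.1))).map
      (fun p => (p.2.1 - t_f, p.1))
  -- min(…, default=(None, None)): `none` is the default, tuples compare lexicographically
  match PySem.List.min2? time_before_each_seizure (fun q => q.1) (fun q => q.2) with
  | none =>
    if overlaps_seizure then acc
    else (acc.1.modify num_seizures (· ++ [segment_num]),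
          acc.2.modify num_seizures (· ++ [end_time - t_f]))
  | some q =>
    if overlaps_seizure then acc
    else (acc.1.modify q.2.toNat (· ++ [segment_num]),
          acc.2.modify q.2.toNat (· ++ [q.1]))

def select_segments_part (num_segments : Int) (seizure_times : List (Int × Int)) : List (List Int) × List (List Int) :=
  let end_time := num_segments * 5
  let num_seizures := seizure_times.length
  let indices : List (List Int) := List.replicate (num_seizures + 1) []
  let Y : List (List Int) := List.replicate (num_seizures + 1) []
  (PySem.List.pyRange 0 num_segments 1).foldl (pvStepA num_seizures end_time seizure_times) (indices, Y)

-- ===== PORT B =====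
-- the `while j < n and order[j][1][0] < t_f` loop; the pointer j is represented by the
-- remaining suffix of `order` (the same traversal, element by element)
def pvAdvance (t_f : Int) : List (Int × (Int × Int)) → Option Int → List (Int × (Int × Int)) × Option Int
  | [], m => ([], m)
  | p :: rest, m =>
    if p.2.1 < t_f then
      pvAdvance t_f rest (some (match m with | none => p.2.2 | some v => if p.2.2 > v then p.2.2 else v))
    else (p :: rest, m)

def pvStepB (n : Nat) (end_time : Int)
    (st : (List (List Int) × List (List Int)) × (List (Int × (Int × Int)) × Option Int))
    (seg : Int) :
    (List (List Int) × List (List Int)) × (List (Int × (Int × Int)) × Option Int) :=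
  let t_i := 5 * seg
  let t_f := t_i + 5
  let adv := pvAdvance t_f st.2.1 st.2.2
  let acc := st.1
  let ov : Bool := match adv.2 with | some v => decide (v > t_i) | none => false
  let acc' :=
    if ov then acc
    else
      match adv.1 with
      | [] => (acc.1.modify n (· ++ [seg]), acc.2.modify n (· ++ [end_time - t_f]))
      | p :: _ => (acc.1.modify p.1.toNat (· ++ [seg]), acc.2.modify p.1.toNat (· ++ [p.2.1 - t_f]))
  (acc', adv)

def select_segments_part_alt (num_segments : Int) (seizure_times : List (Int × Int)) : List (List Int) × List (List Int) :=
  let n := seizure_times.length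
  let end_time := num_segments * 5
  let order := PySem.List.sorted2 (PySem.List.enumerate seizure_times) (fun p => p.2.1) (fun p => p.1)
  let indices : List (List Int) := List.replicate (n + 1) []
  let Y : List (List Int) := List.replicate (n + 1) []
  ((PySem.List.pyRange 0 num_segments 1).foldl (pvStepB n end_time) ((indices, Y), (order, none))).1

-- ===== PRECONDITION & SPEC =====
def Spec_select_segments_part (num_segments : Int) (seizure_times : List (Int × Int)) (out : List (List Int) × List (List Int)) : Prop := out = select_segments_part_alt num_segments seizure_times
instance (num_segments : Int) (seizure_times : List (Int × Int)) (out : List (List Int) × List (List Int)) : Decidable (Spec_select_segments_part num_segments seizure_times out) := by unfold Spec_select_segments_part; infer_instance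

-- ===== CLAIM (what is proved, stated in full; the proofs are below) =====
def Claim_equal_select_segments_part : Prop := ∀ (num_segments : Int) (seizure_times : List (Int × Int)), Dom_select_segments_part num_segments seizure_times → Spec_select_segments_part num_segments seizure_times (select_segments_part num_segments seizure_times)


-- ===== LEMMAS AND PROOFS =====

-- the sort key of B's sweep: (seizure start, original index), compared lexicographically
def pvKey (p : Int × (Int × Int)) : Lex (Int × Int) := toLex (p.2.1, p.1)

def pvL (seizure_times : List (Int × Int)) : List (Int × (Int × Int)) :=
  PySem.List.sorted2 (PySem.List.enumerate seizure_times) (fun p => p.2.1) (fun p => p.1)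

def pvMaxF (m : Option Int) (l : List (Int × (Int × Int))) : Option Int :=
  l.foldl (fun m p => some (match m with | none => p.2.2 | some v => if p.2.2 > v then p.2.2 else v)) m

def pvOGt (m : Option Int) (t : Int) : Bool := match m with | some v => decide (v > t) | none => false

-- loop invariant of B's sweep: the consumed prefix of the sorted list is exactly the
-- seizures starting before c, and m is the running max of their end times
def pvInv (seiz : List (Int × Int)) (c : Int) (rest : List (Int × (Int × Int))) (m : Option Int) : Prop :=
  ∃ pre, pvL seiz = pre ++ rest ∧ (∀ p ∈ pre, p.2.1 < c) ∧ m = pvMaxF none pre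

lemma lex_bool (a b : Int × Int) :
    (decide (a.1 < b.1) || (!decide (b.1 < a.1) && decide (a.2 < b.2)))
      = decide ((toLex a : Lex (Int × Int)) < toLex b) := by
  by_cases h1 : a.1 < b.1 <;> by_cases h2 : b.1 < a.1 <;> by_cases h3 : a.2 < b.2 <;>
    simp [h1, h2, h3, Prod.Lex.lt_iff] <;> omega

lemma pv_min2_eq (xs : List (Int × Int)) :
    PySem.List.min2? xs (fun q => q.1) (fun q => q.2)
      = PySem.List.min? xs (fun q => (toLex (q.1, q.2) : Lex (Int × Int))) := by
  simp only [PySem.List.min2?, PySem.List.min?]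
  congr 1
  funext acc x
  cases acc with
  | none => rfl
  | some m =>
    dsimp only
    by_cases h : (toLex (x.1, x.2) : Lex (Int × Int)) < toLex (m.1, m.2)
    · rw [if_pos (by rw [lex_bool]; exact decide_eq_true h), if_pos h]
    · rw [if_neg (by rw [lex_bool]; simpa using h), if_neg h]

lemma pvL_eq_sorted (seiz : List (Int × Int)) :
    pvL seiz = PySem.List.sorted (PySem.List.enumerate seiz) pvKey := by
  simp only [pvL, PySem.List.sorted2, PySem.List.sorted]
  congr 1
  funext acc x
  congr 1
  funext a b
  exact lex_bool (a.2.1, a.1) (b.2.1, b.1)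

lemma pvL_perm (s : List (Int × Int)) : (pvL s).Perm (PySem.List.enumerate s) :=
  PySem.List.sorted2_perm _ _ _ _

lemma pvL_pairwise (s : List (Int × Int)) :
    (pvL s).Pairwise (fun a b => pvKey a ≤ pvKey b) := by
  rw [pvL_eq_sorted]; exact PySem.List.sorted_pairwise _ _

lemma pvL_ne (s : List (Int × Int)) : (pvL s).Pairwise (fun a b => a.1 ≠ b.1) := by
  have h2 : (PySem.List.enumerate s).Pairwise (fun a b => a.1 ≠ b.1) :=
    (PySem.List.pairwise_lt_enumerate s 0).imp (fun h => ne_of_lt h)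
  exact (List.Perm.pairwise_iff (fun h => Ne.symm h) (pvL_perm s)).mpr h2

lemma pvAdvance_eq (t : Int) (l : List (Int × (Int × Int))) (m : Option Int) :
    pvAdvance t l m = (l.dropWhile (fun p => decide (p.2.1 < t)),
      pvMaxF m (l.takeWhile (fun p => decide (p.2.1 < t)))) := by
  induction l generalizing m with
  | nil => rfl
  | cons p rest ih =>
    by_cases hp : p.2.1 < t
    · simp only [pvAdvance, ih, List.dropWhile_cons, List.takeWhile_cons, hp,
        decide_true, if_pos, pvMaxF, List.foldl_cons]
    · simp only [pvAdvance, List.dropWhile_cons, List.takeWhile_cons, hp,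
        decide_false, pvMaxF, List.foldl_nil, Bool.false_eq_true, ite_false]

lemma pvMaxF_append (m : Option Int) (a b : List (Int × (Int × Int))) :
    pvMaxF m (a ++ b) = pvMaxF (pvMaxF m a) b := by
  simp [pvMaxF, List.foldl_append]

lemma pvOGt_maxF (t : Int) (l : List (Int × (Int × Int))) (m : Option Int) :
    pvOGt (pvMaxF m l) t = (pvOGt m t || l.any fun p => decide (p.2.2 > t)) := by
  induction l generalizing m with
  | nil => simp [pvMaxF]
  | cons p rest ih =>
    rw [show pvMaxF m (p :: rest)
        = pvMaxF (some (match m with | none => p.2.2 | some v => if p.2.2 > v then p.2.2 else v)) rest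
      from rfl, ih]
    cases m with
    | none => simp [pvOGt, List.any_cons]
    | some v =>
      by_cases h : p.2.2 > v <;> by_cases h2 : v > t <;> by_cases h3 : p.2.2 > t <;>
        simp [pvOGt, h, h2, h3, List.any_cons] <;> omega

lemma pv_min?_unique {xs : List (Int × Int)} {x : Int × Int}
    (hx : x ∈ xs)
    (hmin : ∀ y ∈ xs, y ≠ x → (toLex (x.1, x.2) : Lex (Int × Int)) < toLex (y.1, y.2)) :
    PySem.List.min? xs (fun q => (toLex (q.1, q.2) : Lex (Int × Int))) = some x := by
  cases hr : PySem.List.min? xs (fun q => (toLex (q.1, q.2) : Lex (Int × Int))) with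
  | none => rw [PySem.List.min?_eq_none_iff] at hr; subst hr; simp at hx
  | some r =>
    have hrmem := PySem.List.min?_mem hr
    have hle := PySem.List.min?_isMin hr x hx
    by_cases hrx : r = x
    · rw [hrx]
    · exact absurd hle (not_le_of_gt (hmin r hrmem hrx))

lemma pv_perm_any {α : Type} {l l' : List α} (h : l.Perm l') (f : α → Bool) :
    l.any f = l'.any f := by
  rw [Bool.eq_iff_iff, List.any_eq_true, List.any_eq_true]
  constructor <;> rintro ⟨x, hx, hfx⟩
  · exact ⟨x, h.mem_iff.mp hx, hfx⟩
  · exact ⟨x, h.mem_iff.mpr hx, hfx⟩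

lemma pv_any_snd (seiz : List (Int × Int)) (h : Int × Int → Bool) :
    (PySem.List.enumerate seiz).any (fun p => h p.2) = seiz.any h := by
  conv_rhs => rw [← PySem.List.map_snd_enumerate seiz 0]
  rw [List.any_map]
  rfl

lemma pvStep_eq (seiz : List (Int × Int)) (e : Int) (s : Int)
    (acc : List (List Int) × List (List Int)) (rest : List (Int × (Int × Int))) (m : Option Int)
    (hInv : pvInv seiz (5 * s) rest m) :
    pvStepA seiz.length e seiz acc s = (pvStepB seiz.length e (acc, (rest, m)) s).1 ∧
      pvInv seiz (5 * (s + 1)) (pvStepB seiz.length e (acc, (rest, m)) s).2.1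
        (pvStepB seiz.length e (acc, (rest, m)) s).2.2 := by
  obtain ⟨pre, hL, hpre, hm⟩ := hInv
  have hadv' : pvAdvance (5 * s + 5) rest m
      = (rest.dropWhile (fun p => decide (p.2.1 < 5 * s + 5)),
         pvMaxF none (pre ++ rest.takeWhile (fun p => decide (p.2.1 < 5 * s + 5)))) := by
    rw [pvAdvance_eq, hm, ← pvMaxF_append]
  have hL' : pvL seiz
      = (pre ++ rest.takeWhile (fun p => decide (p.2.1 < 5 * s + 5)))
        ++ rest.dropWhile (fun p => decide (p.2.1 < 5 * s + 5)) := by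
    rw [hL, List.append_assoc, List.takeWhile_append_dropWhile]
  have hpre' : ∀ p ∈ pre ++ rest.takeWhile (fun p => decide (p.2.1 < 5 * s + 5)),
      p.2.1 < 5 * s + 5 := by
    intro p hp
    rcases List.mem_append.mp hp with h | h
    · have := hpre p h; omega
    · have := List.mem_takeWhile_imp h; simpa using this
  have hpairRest' : (rest.dropWhile (fun p => decide (p.2.1 < 5 * s + 5))).Pairwise
      (fun a b => pvKey a ≤ pvKey b) := by
    have hp := pvL_pairwise seiz
    rw [hL'] at hp
    exact (List.pairwise_append.mp hp).2.1
  have hneRest' : (rest.dropWhile (fun p => decide (p.2.1 < 5 * s + 5))).Pairwise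
      (fun a b => a.1 ≠ b.1) := by
    have hp := pvL_ne seiz
    rw [hL'] at hp
    exact (List.pairwise_append.mp hp).2.1
  have hrest' : ∀ p ∈ rest.dropWhile (fun p => decide (p.2.1 < 5 * s + 5)),
      5 * s + 5 ≤ p.2.1 := by
    intro p hp
    cases hr : rest.dropWhile (fun p => decide (p.2.1 < 5 * s + 5)) with
    | nil => rw [hr] at hp; cases hp
    | cons q tail =>
      rw [hr] at hp
      have hq : ¬ (q.2.1 < 5 * s + 5) := by
        have := List.head?_dropWhile_not (fun p : Int × (Int × Int) => decide (p.2.1 < 5 * s + 5)) rest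
        rw [hr] at this; simpa using this
      rcases List.mem_cons.mp hp with rfl | htail
      · omega
      · have hpw := hpairRest'
        rw [hr] at hpw
        have hle := (List.pairwise_cons.mp hpw).1 p htail
        simp only [pvKey] at hle
        have : q.2.1 ≤ p.2.1 := by
          rcases Prod.Lex.le_iff.mp hle with hlt | ⟨heq, _⟩
          · simp only [ofLex_toLex] at hlt; exact le_of_lt hlt
          · simp only [ofLex_toLex] at heq; exact le_of_eq heq
        omega
  have hfilter_lt : (pvL seiz).filter (fun p => decide (p.2.1 < 5 * s + 5))
      = pre ++ rest.takeWhile (fun p => decide (p.2.1 < 5 * s + 5)) := by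
    rw [hL', List.filter_append]
    rw [List.filter_eq_self.mpr (fun a ha => by simpa using hpre' a ha),
        List.filter_eq_nil_iff.mpr (fun a ha => by have := hrest' a ha; simp; omega),
        List.append_nil]
  have hfilter_ge : (pvL seiz).filter (fun p => decide (5 * s + 5 ≤ p.2.1))
      = rest.dropWhile (fun p => decide (p.2.1 < 5 * s + 5)) := by
    rw [hL', List.filter_append]
    rw [List.filter_eq_nil_iff.mpr (fun a ha => by have := hpre' a ha; simp; omega),
        List.filter_eq_self.mpr (fun a ha => by simpa using hrest' a ha),
        List.nil_append]
  have hperm_lt : ((PySem.List.enumerate seiz).filter (fun p => decide (p.2.1 < 5 * s + 5))).Perm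
      (pre ++ rest.takeWhile (fun p => decide (p.2.1 < 5 * s + 5))) := by
    have h := List.Perm.filter (fun p => decide (p.2.1 < 5 * s + 5)) (pvL_perm seiz)
    rw [hfilter_lt] at h
    exact h.symm
  have hperm_ge : ((PySem.List.enumerate seiz).filter (fun p => decide (5 * s + 5 ≤ p.2.1))).Perm
      (rest.dropWhile (fun p => decide (p.2.1 < 5 * s + 5))) := by
    have h := List.Perm.filter (fun p => decide (5 * s + 5 ≤ p.2.1)) (pvL_perm seiz)
    rw [hfilter_ge] at h
    exact h.symm
  -- the overlap tests agree
  have hov : pvAnyOverlap (5 * s) (5 * s + 5) seiz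
      = pvOGt (pvMaxF none (pre ++ rest.takeWhile (fun p => decide (p.2.1 < 5 * s + 5)))) (5 * s) := by
    rw [pvOGt_maxF]
    have h1 : (pre ++ rest.takeWhile (fun p => decide (p.2.1 < 5 * s + 5))).any
        (fun p => decide (p.2.2 > 5 * s))
        = ((PySem.List.enumerate seiz).filter (fun p => decide (p.2.1 < 5 * s + 5))).any
          (fun p => decide (p.2.2 > 5 * s)) :=
      (pv_perm_any hperm_lt (fun p => decide (p.2.2 > 5 * s))).symm
    rw [show pvOGt none (5 * s) = false from rfl, Bool.false_or, h1, List.any_filter]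
    rw [pv_any_snd seiz (fun q => decide (q.1 < 5 * s + 5) && decide (q.2 > 5 * s))]
    simp only [pvAnyOverlap]
    congr 1
    funext q
    simp only [pvOverlaps]
    by_cases h1 : q.1 < 5 * s + 5 <;> by_cases h2 : 5 * s < q.2 <;> simp [h1, h2]
  have hov2 : (match pvMaxF none (pre ++ rest.takeWhile (fun p => decide (p.2.1 < 5 * s + 5))) with
      | some v => decide (v > 5 * s) | none => false) = pvAnyOverlap (5 * s) (5 * s + 5) seiz :=
    hov.symm
  constructor
  · -- the two steps produce the same output buckets
    simp only [pvStepA, pvStepB]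
    rw [show (5:Int) * (s + 0) = 5 * s from by ring, show (5:Int) * (s + 1) = 5 * s + 5 from by ring]
    rw [hadv']
    cases hr : rest.dropWhile (fun p => decide (p.2.1 < 5 * s + 5)) with
    | nil =>
      have htb : (PySem.List.enumerate seiz).filter (fun p => decide (5 * s + 5 ≤ p.2.1)) = [] := by
        have h0 := hperm_ge
        rw [hr] at h0
        exact h0.eq_nil
      rw [htb]
      rw [hov2]
      rfl
    | cons q tail =>
      have hq_ge : 5 * s + 5 ≤ q.2.1 := hrest' q (by rw [hr]; exact List.mem_cons_self)
      have hq_enum : q ∈ PySem.List.enumerate seiz := by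
        have : q ∈ pvL seiz := by
          rw [hL', hr]
          exact List.mem_append_right _ List.mem_cons_self
        exact (pvL_perm seiz).mem_iff.mp this
      have hx_mem : (q.2.1 - (5 * s + 5), q.1)
          ∈ ((PySem.List.enumerate seiz).filter (fun p => decide (5 * s + 5 ≤ p.2.1))).map
            (fun p => (p.2.1 - (5 * s + 5), p.1)) :=
        List.mem_map.mpr ⟨q, List.mem_filter.mpr ⟨hq_enum, by simpa using hq_ge⟩, rfl⟩
      have hmin : ∀ y ∈ ((PySem.List.enumerate seiz).filter
            (fun p => decide (5 * s + 5 ≤ p.2.1))).map (fun p => (p.2.1 - (5 * s + 5), p.1)),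
          y ≠ (q.2.1 - (5 * s + 5), q.1) →
          (toLex ((q.2.1 - (5 * s + 5), q.1).1, (q.2.1 - (5 * s + 5), q.1).2) : Lex (Int × Int))
            < toLex (y.1, y.2) := by
        intro y hy hne
        obtain ⟨p, hpf, rfl⟩ := List.mem_map.mp hy
        obtain ⟨hpe, hpc⟩ := List.mem_filter.mp hpf
        have hpL : p ∈ pvL seiz := (pvL_perm seiz).mem_iff.mpr hpe
        rw [hL'] at hpL
        rcases List.mem_append.mp hpL with hpr | hpr
        · have := hpre' p hpr; simp at hpc; omega
        · rw [hr] at hpr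
          rcases List.mem_cons.mp hpr with rfl | htail
          · exact absurd rfl hne
          · have hle : pvKey q ≤ pvKey p := by
              have hpw := hpairRest'; rw [hr] at hpw
              exact (List.pairwise_cons.mp hpw).1 p htail
            have hner : q.1 ≠ p.1 := by
              have hpw := hneRest'; rw [hr] at hpw
              exact (List.pairwise_cons.mp hpw).1 p htail
            simp only [pvKey] at hle
            rw [Prod.Lex.lt_iff]
            simp only [ofLex_toLex]
            rcases Prod.Lex.le_iff.mp hle with hlt | ⟨heq, hle2⟩
            · simp only [ofLex_toLex] at hlt; left; omega
            · simp only [ofLex_toLex] at heq hle2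
              right
              exact ⟨by omega, by omega⟩
      have hlast : PySem.List.min2? (((PySem.List.enumerate seiz).filter
            (fun p => decide (5 * s + 5 ≤ p.2.1))).map (fun p => (p.2.1 - (5 * s + 5), p.1)))
          (fun q => q.1) (fun q => q.2) = some (q.2.1 - (5 * s + 5), q.1) := by
        rw [pv_min2_eq]
        exact pv_min?_unique hx_mem hmin
      rw [hlast]
      rw [hov2]
  · -- the invariant is maintained
    simp only [pvStepB]
    rw [hadv']
    rw [show (5:Int) * (s + 1) = 5 * s + 5 from by ring]
    exact ⟨pre ++ rest.takeWhile (fun p => decide (p.2.1 < 5 * s + 5)), hL', hpre', rfl⟩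

lemma pvFold_eq (seiz : List (Int × Int)) (e : Int) :
    ∀ (cnt : Nat) (s : Int) (acc : List (List Int) × List (List Int))
      (rest : List (Int × (Int × Int))) (m : Option Int),
      pvInv seiz (5 * s) rest m →
      (PySem.List.pyRange s (s + cnt) 1).foldl (pvStepA seiz.length e seiz) acc
        = ((PySem.List.pyRange s (s + cnt) 1).foldl (pvStepB seiz.length e) (acc, (rest, m))).1 := by
  intro cnt
  induction cnt with
  | zero =>
    intro s acc rest m _
    rw [show s + ((0:Nat):Int) = s by simp, PySem.List.pyRange_one_eq_nil le_rfl]; rfl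
  | succ k ih =>
    intro s acc rest m hInv
    have hlt : s < s + ((k+1 : Nat) : Int) := by push_cast; omega
    rw [PySem.List.pyRange_one_cons hlt]
    simp only [List.foldl_cons]
    obtain ⟨heq, hInv'⟩ := pvStep_eq seiz e s acc rest m hInv
    rw [heq]
    have hrange : s + ((k+1 : Nat) : Int) = (s + 1) + ((k : Nat) : Int) := by push_cast; omega
    rw [hrange]
    have h2 := ih (s+1) ((pvStepB seiz.length e (acc, (rest, m)) s).1)
      ((pvStepB seiz.length e (acc, (rest, m)) s).2.1)
      ((pvStepB seiz.length e (acc, (rest, m)) s).2.2) hInv'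
    simpa using h2

theorem pv_main (num : Int) (seiz : List (Int × Int)) :
    select_segments_part num seiz = select_segments_part_alt num seiz := by
  simp only [select_segments_part, select_segments_part_alt]
  by_cases h : num ≤ 0
  · rw [PySem.List.pyRange_one_eq_nil h]; rfl
  · have h0 : (0:Int) ≤ num := by omega
    have hnum : num = 0 + ((num.toNat : Nat) : Int) := by
      simp [Int.toNat_of_nonneg h0]
    have hbase : pvInv seiz (5 * 0) (pvL seiz) none := ⟨[], rfl, by simp, rfl⟩
    calc (PySem.List.pyRange 0 num 1).foldl (pvStepA seiz.length (num * 5) seiz)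
          (List.replicate (seiz.length + 1) [], List.replicate (seiz.length + 1) [])
        = ((PySem.List.pyRange 0 num 1).foldl (pvStepB seiz.length (num * 5))
            ((List.replicate (seiz.length + 1) [], List.replicate (seiz.length + 1) []),
              (pvL seiz, none))).1 := by
          rw [show (PySem.List.pyRange 0 num 1) = PySem.List.pyRange 0 (0 + ((num.toNat : Nat) : Int)) 1
            from by rw [← hnum]]
          exact pvFold_eq seiz (num * 5) num.toNat 0 _ _ _ hbase
      _ = _ := rfl

-- ===== VERDICT (by name: the statement is the Claim_ definition above) =====
theorem select_segments_part_spec : Claim_equal_select_segments_part := by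
  intro num seiz _
  exact pv_main num seiz
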